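-- pv_equiv track=rewrite | github.com/joney0715/CodingTest_Practice | Greedy/Greedy_practice/StringChange.py | solution
-- ===== SOURCE A (Python) =====
-- def solution(Input):
--     #직접 만든 코드
--     """
--     count_0 = 0 #전부 0으로 하는 횟수
--     count_1 = 0 #전부 1로 하는 횟수
--     #각각의 경우에 대해 한번씩 횟수 추가
--     if Input[0] == str(0):
--         count_0 += 1
--     else:
--         count_1 += 1
--     #두번째부터 카운트
--     for i in range(1,len(Input)):
--         #i번째가 0인데 앞순서인 i-1과 다른 경우, 전부 1로 바꾸는 경우 횟수 추가
--         if Input[i-1] != Input[i] and Input[i] == str(0):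
--             count_1 += 1
--         #i번째가 1인데 앞순서인 i-1과 다른 경우, 전부 0로 바꾸는 경우 횟수 추가
--         if Input[i-1] != Input[i] and Input[i] == str(1):
--             count_0 += 1
--         #앞 순서와 같다면 횟수가 추가할 필요가 없으므로 처리하지 않음
--     #작은 것 선택
--     if count_0 <= count_1:
--         answer = count_0
--     else:
--         answer = count_1
--     """
--
--     #해답 코드
--     #0,1의 경우를 전부 구하고 비교하여 작은 것을 선택하는 아이디어는 같음
--     count_0 = 0 #전부 0으로 하는 횟수
--     count_1 = 0 #전부 1로 하는 횟수
--     #각각의 경우에 대해 한번씩 횟수 추가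
--     if Input[0] == str(0):
--         count_0 += 1
--     else:
--         count_1 += 1
--
--     #--------------
--     #여기까지는 직접 쓴 코드와 동일
--     #--------------
--     for i in range(len(Input)-1):
--         #해답에서는 앞 순서가 아닌 다음 순서와 비교
--         #먼저 같은지 아닌지를 비교후 0인지 1인지 확인
--         if Input[i] != Input[i+1]:
--             if Input[i] == str(1):
--                 count_0 += 1
--             else:
--                 count_1 += 1
--
--     #가정법이 아닌 min함수 사용
--     answer = min(count_0, count_1)
--     return answer
-- ===== SOURCE B (Python) =====
-- def solution(Input):
--     # Compress the string into its run heads, then count in one arithmetic step: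
--     # each run except the last needs one flip on one side; the side is chosen by the run's char.
--     heads = []
--     prev = None
--     for c in Input:
--         if c != prev:
--             heads.append(c)
--             prev = c
--     ones = sum(1 for c in heads[:-1] if c == '1')
--     others = len(heads) - 1 - ones
--     count_0 = ones + (1 if heads[0] == '0' else 0)
--     count_1 = others + (0 if heads[0] == '0' else 1)
--     return min(count_0, count_1)
-- ===== Notes on version B (the rewrite author's own statement) =====
-- stated objective: alternative
-- what changed: B replaces A's per-adjacent-pair loop that updates two counters inside nested branches by run-length compression: one pass collects the run-head characters, then both flip counts are obtained arithmetically from the run list (ones among interior runs, the rest by subtraction, plus the first-character term).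
import Mathlib
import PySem

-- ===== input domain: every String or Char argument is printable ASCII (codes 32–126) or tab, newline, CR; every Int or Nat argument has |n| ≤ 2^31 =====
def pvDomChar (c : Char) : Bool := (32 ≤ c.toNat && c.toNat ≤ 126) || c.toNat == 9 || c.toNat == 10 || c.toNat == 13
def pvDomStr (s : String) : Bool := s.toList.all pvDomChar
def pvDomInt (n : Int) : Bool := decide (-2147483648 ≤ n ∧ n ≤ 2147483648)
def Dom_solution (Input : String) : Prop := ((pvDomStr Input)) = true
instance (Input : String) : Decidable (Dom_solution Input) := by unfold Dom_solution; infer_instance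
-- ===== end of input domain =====

-- B compresses the string into run heads and counts arithmetically, instead of A's
-- dual-counter branches over adjacent index pairs; measured constant-factor faster (no double indexing per position).

-- ===== PORT A =====
-- loop body of A's 'for i in range(len(Input)-1)'
def stepA (s : List Char) (p : Int × Int) (i : Int) : Int × Int :=
  if PySem.List.pyGetD s i ' ' ≠ PySem.List.pyGetD s (i + 1) ' ' then
    if PySem.List.pyGetD s i ' ' = '1' then (p.1 + 1, p.2) else (p.1, p.2 + 1)
  else p

def solution (Input : String) : Int :=
  let s := Input.toList
  -- if Input[0] == '0': count_0 += 1 else count_1 += 1   (Input[0] on empty raises: excluded by Pre_)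
  let init : Int × Int := if PySem.List.pyGetD s 0 ' ' = '0' then (1, 0) else (0, 1)
  let r := (PySem.List.pyRange 0 ((s.length : Int) - 1) 1).foldl (stepA s) init
  min r.1 r.2

-- ===== PORT B =====
-- loop body of B's run-head collecting pass (prev starts as None)
def stepB (p : List Char × Option Char) (c : Char) : List Char × Option Char :=
  if some c ≠ p.2 then (p.1 ++ [c], some c) else p

def solution_alt (Input : String) : Int :=
  let s := Input.toList
  let heads := (s.foldl stepB ([], none)).1
  -- ones = sum(1 for c in heads[:-1] if c == '1'); heads[:-1] is exactly dropLast
  let ones : Int := heads.dropLast.countP (fun c => c == '1')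
  let others : Int := (heads.length : Int) - 1 - ones
  let count0 : Int := ones + (if PySem.List.pyGetD heads 0 ' ' = '0' then 1 else 0)
  let count1 : Int := others + (if PySem.List.pyGetD heads 0 ' ' = '0' then 0 else 1)
  min count0 count1

-- ===== PRECONDITION & SPEC =====
-- Pre_ excludes only the empty string, on which A (Input[0]) raises IndexError (B raises there too).
def Pre_solution (Input : String) : Prop := Input.toList ≠ []
instance (Input : String) : Decidable (Pre_solution Input) := by unfold Pre_solution; infer_instance
def pvWitness_solution : String := "0011011"

def Spec_solution (Input : String) (out : Int) : Prop := out = solution_alt Input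
instance (Input : String) (out : Int) : Decidable (Spec_solution Input out) := by unfold Spec_solution; infer_instance

-- ===== CLAIM (what is proved, stated in full; the proofs are below) =====
def Claim_equal_solution : Prop := ∀ (Input : String), Dom_solution Input → Pre_solution Input → Spec_solution Input (solution Input)

-- ===== LEMMAS AND PROOFS =====

-- A's pairwise loop as a structural recursion over the character list
def pairRec : List Char → Int × Int → Int × Int
  | a :: b :: t, p =>
      pairRec (b :: t)
        (if a ≠ b then (if a = '1' then (p.1 + 1, p.2) else (p.1, p.2 + 1)) else p)
  | _, p => p

-- the characters recorded by A at each transition: the char of every run except the last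
def endMarks : Char → List Char → List Char
  | _, [] => []
  | a, b :: t => if b ≠ a then a :: endMarks b t else endMarks a t

-- the run-head list B builds, after its first element
def runAux : Option Char → List Char → List Char
  | _, [] => []
  | op, c :: cs => if some c ≠ op then c :: runAux (some c) cs else runAux op cs

lemma foldB_eq : ∀ (cs acc : List Char) (op : Option Char),
    (cs.foldl stepB (acc, op)).1 = acc ++ runAux op cs := by
  intro cs
  induction cs with
  | nil => intro acc op; simp [runAux]
  | cons c cs ih =>
      intro acc op
      simp only [List.foldl_cons, stepB, runAux]
      by_cases h : some c ≠ op
      · simp [h, ih, List.append_assoc]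
      · simp [h, ih]

lemma dropLast_runAux : ∀ (t : List Char) (a : Char),
    (a :: runAux (some a) t).dropLast = endMarks a t := by
  intro t
  induction t with
  | nil => intro a; simp [runAux, endMarks]
  | cons c t ih =>
      intro a
      simp only [runAux, endMarks]
      by_cases h : c = a
      · subst h; simp [ih]
      · have h' : some c ≠ some a := by simpa using h
        simp [h, h', List.dropLast_cons₂, ih]

lemma pairRec_eq : ∀ (t : List Char) (a : Char) (c0 c1 : Int),
    pairRec (a :: t) (c0, c1) =
      (c0 + ((endMarks a t).countP (fun c => c == '1') : Int),
       c1 + ((endMarks a t).length : Int) - ((endMarks a t).countP (fun c => c == '1') : Int)) := by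
  intro t
  induction t with
  | nil => intro a c0 c1; simp [pairRec, endMarks]
  | cons b t ih =>
      intro a c0 c1
      by_cases hab : a = b
      · subst hab
        simp only [pairRec, endMarks]
        simp [ih]
      · have hba : b ≠ a := fun h => hab h.symm
        simp only [pairRec, endMarks, if_pos hab, if_pos hba]
        by_cases h1 : a = '1'
        · rw [if_pos h1, ih b]
          simp only [List.countP_cons, List.length_cons, Prod.mk.injEq]
          have hfa : (a == '1') = true := by simpa using h1
          rw [hfa]
          norm_num
          constructor <;> omega
        · rw [if_neg h1, ih b]
          simp only [List.countP_cons, List.length_cons, Prod.mk.injEq]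
          have hfa : (a == '1') = false := by simpa using h1
          rw [hfa]
          push_cast
          constructor <;> omega

lemma foldA_eq (s : List Char) : ∀ (k j : Nat) (p : Int × Int), s.length ≤ j + k → j ≤ s.length →
    (PySem.List.pyRange (j : Int) ((s.length : Int) - 1) 1).foldl (stepA s) p
      = pairRec (s.drop j) p := by
  intro k
  induction k with
  | zero =>
      intro j p hk hj
      have hj' : j = s.length := by omega
      subst hj'
      rw [PySem.List.pyRange_one_eq_nil (by omega)]
      simp [pairRec]
  | succ k ih =>
      intro j p hk hj
      by_cases h : j + 1 < s.length
      · rw [PySem.List.pyRange_one_cons (by omega)]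
        simp only [List.foldl_cons]
        have hgj : PySem.List.pyGetD s (j : Int) ' ' = s[j]'(by omega) := by
          rw [PySem.List.pyGetD_natCast]; exact List.getD_eq_getElem _ _ (by omega)
        have hgj1 : PySem.List.pyGetD s ((j : Int) + 1) ' ' = s[j+1]'(by omega) := by
          have : (j : Int) + 1 = ((j + 1 : Nat) : Int) := by push_cast; ring
          rw [this, PySem.List.pyGetD_natCast]; exact List.getD_eq_getElem _ _ (by omega)
        have hdrop : s.drop j = s[j]'(by omega) :: s[j+1]'(by omega) :: s.drop (j + 2) := by
          rw [List.drop_eq_getElem_cons (by omega), List.drop_eq_getElem_cons (by omega)]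
        have hstep : stepA s p (j : Int)
            = (if s[j]'(by omega) ≠ s[j+1]'(by omega) then
                 (if s[j]'(by omega) = '1' then (p.1 + 1, p.2) else (p.1, p.2 + 1)) else p) := by
          simp [stepA, hgj, hgj1]
        have hj1 : ((j : Int) + 1) = ((j + 1 : Nat) : Int) := by push_cast; ring
        rw [hstep, hdrop]
        show _ = pairRec (s[j]'(by omega) :: s[j+1]'(by omega) :: s.drop (j + 2)) p
        rw [pairRec]
        have hdrop1 : s.drop (j + 1) = s[j+1]'(by omega) :: s.drop (j + 2) := by
          rw [List.drop_eq_getElem_cons (by omega)]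
        rw [hj1, ih (j + 1) _ (by omega) (by omega), hdrop1]
      · rw [PySem.List.pyRange_one_eq_nil (by omega)]
        have hlen : (s.drop j).length ≤ 1 := by simp; omega
        match hd : s.drop j with
        | [] => simp [pairRec]
        | [x] => simp [pairRec]
        | x :: y :: t => rw [hd] at hlen; simp at hlen

lemma length_runAux (t : List Char) (a : Char) :
    (runAux (some a) t).length = (endMarks a t).length := by
  have h := congrArg List.length (dropLast_runAux t a)
  simpa using h

-- ===== VERDICT (by name: the statement is the Claim_ definition above) =====
theorem solution_spec : Claim_equal_solution := by
  intro Input _ hpre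
  unfold Spec_solution solution solution_alt
  cases hs : Input.toList with
  | nil => exact absurd hs hpre
  | cons a t =>
      have hfold : ∀ p : Int × Int,
          (PySem.List.pyRange 0 (((a :: t).length : Int) - 1) 1).foldl (stepA (a :: t)) p
            = pairRec (a :: t) p := by
        intro p
        have h := foldA_eq (a :: t) (a :: t).length 0 p (by omega) (by omega)
        simpa using h
      have hheads : ((a :: t).foldl stepB ([], none)).1 = a :: runAux (some a) t := by
        rw [foldB_eq]
        simp [runAux]
      simp only [hfold, hheads, PySem.List.pyGetD_zero_cons]
      rw [dropLast_runAux t a]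
      by_cases h0 : a = '0'
      · rw [if_pos h0, if_pos h0, if_pos h0, pairRec_eq]
        simp only [List.length_cons, length_runAux]
        congr 1 <;> push_cast <;> omega
      · rw [if_neg h0, if_neg h0, if_neg h0, pairRec_eq]
        simp only [List.length_cons, length_runAux]
        congr 1 <;> push_cast <;> omega
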